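-- pv_equiv track=rewrite | github.com/FabBodson/Bac1 | Programmation_de_Base/LabosPRB/labo7/matrice2d.py | maximum_par_colonne
-- ===== SOURCE A (Python) =====
-- def maximum_par_colonne(matrice):
--     """
--     Cette fonction retourne une liste contenant la plus grande valeur contenue dans chaque colonne.
--     Exemple:
--
--     | 7, 3, 8 |
--     | 6, 4, 1 | --> [ 7, 4, 8 ]
--     | 5, 2, 7 |
--
--     :param matrice: list, liste 2D de nombres entiers
--     :return: list, contenant la valeur maximum de chaque colonne.
--     """
--
--     max_colonne, max_temporaire = [], []
--     i, j = 0, 0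
--     for element in matrice:
--         for i in range(len(matrice)):
--             max_temporaire.append(matrice[i][j])
--
--         max_colonne.append(max(max_temporaire))
--         max_temporaire = []
--         j += 1
--
--     return max_colonne
-- ===== SOURCE B (Python) =====
-- def maximum_par_colonne(matrice):
--     if not matrice:
--         return []
--     n = len(matrice)
--     resultat = [matrice[0][j] for j in range(n)]
--     for row in matrice[1:]:
--         resultat = [row[j] if row[j] > resultat[j] else resultat[j] for j in range(n)]
--     return resultat
-- ===== Notes on version B (the rewrite author's own statement) =====
-- stated objective: alternative
-- what changed: B replaces A's per-column gather (building a temporary column list and calling max for each of the n columns) with a single row-major pass that maintains a running per-column maximum vector, keeping A's square-matrix indexing (both indices range over len(matrice)).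
import Mathlib
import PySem

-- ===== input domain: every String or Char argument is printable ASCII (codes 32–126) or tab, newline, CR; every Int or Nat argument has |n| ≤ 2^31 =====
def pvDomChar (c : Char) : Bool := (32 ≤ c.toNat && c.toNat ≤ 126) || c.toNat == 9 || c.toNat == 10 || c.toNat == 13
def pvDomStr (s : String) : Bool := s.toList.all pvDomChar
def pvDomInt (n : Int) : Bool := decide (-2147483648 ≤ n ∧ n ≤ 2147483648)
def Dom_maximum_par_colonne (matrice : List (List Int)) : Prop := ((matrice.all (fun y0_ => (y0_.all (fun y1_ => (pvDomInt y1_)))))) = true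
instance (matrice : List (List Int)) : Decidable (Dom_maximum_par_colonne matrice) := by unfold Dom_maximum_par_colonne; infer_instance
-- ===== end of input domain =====

-- B maintains one running per-column-maximum vector in a single row-major pass instead of
-- A's per-column gather-then-max; same O(n^2) work, different traversal (objective: alternative).

-- ===== PORT A =====
-- literal port of A: outer loop over the rows carries (max_colonne, j); the inner loop
-- appends matrice[i][j] for i in range(len(matrice)) into max_temporaire, then max() of it
-- is appended to max_colonne and j is incremented.  matrice[i][j] is ported with pyGetD
-- (Python's IndexError inputs are excluded by Pre_); max() of the nonempty temp list is
-- PySem.List.max? (never none on the loop's nonempty temp; .getD 0 is unreachable).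
def maximum_par_colonne (matrice : List (List Int)) : List Int :=
  (matrice.foldl
    (fun (st : List Int × Int) _ =>
      let max_temporaire :=
        (PySem.List.pyRange 0 matrice.length 1).foldl
          (fun acc i => acc ++ [PySem.List.pyGetD (PySem.List.pyGetD matrice i []) st.2 0]) []
      (st.1 ++ [(PySem.List.max? max_temporaire (fun x => x)).getD 0], st.2 + 1))
    ([], 0)).1

-- ===== PORT B =====
-- literal port of B: empty matrix → []; otherwise initialise the result vector from row 0,
-- then one pass over the remaining rows rebuilding the running-maximum vector per row.
def maximum_par_colonne_alt (matrice : List (List Int)) : List Int :=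
  match matrice with
  | [] => []
  | r0 :: rest =>
    rest.foldl
      (fun res row =>
        (PySem.List.pyRange 0 matrice.length 1).map
          (fun j =>
            if PySem.List.pyGetD row j 0 > PySem.List.pyGetD res j 0 then
              PySem.List.pyGetD row j 0
            else PySem.List.pyGetD res j 0))
      ((PySem.List.pyRange 0 matrice.length 1).map (fun j => PySem.List.pyGetD r0 j 0))

-- ===== PRECONDITION & SPEC =====
-- Pre_ excludes exactly the inputs where Python A raises IndexError: some row shorter than
-- the number of rows (A indexes matrice[i][j] with both i and j below len(matrice)).
def Pre_maximum_par_colonne (matrice : List (List Int)) : Prop :=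
  ∀ r ∈ matrice, matrice.length ≤ r.length
instance (matrice : List (List Int)) : Decidable (Pre_maximum_par_colonne matrice) := by
  unfold Pre_maximum_par_colonne; infer_instance
def pvWitness_maximum_par_colonne : List (List Int) := [[7, 3, 8], [6, 4, 1], [5, 2, 7]]

def Spec_maximum_par_colonne (matrice : List (List Int)) (out : List Int) : Prop :=
  out = maximum_par_colonne_alt matrice
instance (matrice : List (List Int)) (out : List Int) : Decidable (Spec_maximum_par_colonne matrice out) := by
  unfold Spec_maximum_par_colonne; infer_instance

-- ===== CLAIM (what is proved, stated in full; the proofs are below) =====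
def Claim_equal_maximum_par_colonne : Prop :=
  ∀ (matrice : List (List Int)), Dom_maximum_par_colonne matrice →
    Pre_maximum_par_colonne matrice →
    Spec_maximum_par_colonne matrice (maximum_par_colonne matrice)

-- ===== LEMMAS AND PROOFS =====

-- A's outer loop: appending f j and incrementing j is a map over the iteration indices.
theorem pvFoldA {α : Type} (f : Int → Int) :
    ∀ (l : List α) (acc : List Int) (j : Int),
      (l.foldl (fun (st : List Int × Int) _ => (st.1 ++ [f st.2], st.2 + 1)) (acc, j)).1
        = acc ++ (List.range l.length).map (fun k : Nat => f (j + (k : Int))) := by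
  intro l
  induction l with
  | nil => intro acc j; simp
  | cons x t ih =>
    intro acc j
    rw [List.foldl_cons, ih, List.length_cons, List.range_succ_eq_map, List.map_cons,
      List.map_map, List.append_assoc, List.singleton_append]
    congr 1
    congr 1
    · exact congrArg f (by push_cast; ring)
    · apply List.map_congr_left
      intro k _
      exact congrArg f (by push_cast; ring)

-- B's pass: folding the per-row running-maximum rebuild over rows, starting from a vector
-- that is a map over pyRange, yields the columnwise fold of the rows' entries.
theorem pvFoldB (n : Int) :
    ∀ (rows : List (List Int)) (h : Int → Int),
      rows.foldl
        (fun res row =>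
          (PySem.List.pyRange 0 n 1).map
            (fun j =>
              if PySem.List.pyGetD row j 0 > PySem.List.pyGetD res j 0 then
                PySem.List.pyGetD row j 0
              else PySem.List.pyGetD res j 0))
        ((PySem.List.pyRange 0 n 1).map h)
      = (PySem.List.pyRange 0 n 1).map
          (fun j => (rows.map (fun r => PySem.List.pyGetD r j 0)).foldl
            (fun a b => if b > a then b else a) (h j)) := by
  intro rows
  induction rows with
  | nil => intro h; simp
  | cons row t ih =>
    intro h
    simp only [List.foldl_cons]
    have hstep :
        (PySem.List.pyRange 0 n 1).map
          (fun j =>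
            if PySem.List.pyGetD row j 0 > PySem.List.pyGetD ((PySem.List.pyRange 0 n 1).map h) j 0 then
              PySem.List.pyGetD row j 0
            else PySem.List.pyGetD ((PySem.List.pyRange 0 n 1).map h) j 0)
        = (PySem.List.pyRange 0 n 1).map
            (fun j => if PySem.List.pyGetD row j 0 > h j then PySem.List.pyGetD row j 0 else h j) := by
      apply List.map_congr_left
      intro j hj
      have hj' := (PySem.List.mem_pyRange_one).1 hj
      rw [PySem.List.pyGetD_map_pyRange_of_nonneg h n j 0 hj'.1 hj'.2]
    rw [hstep, ih]
    simp only [List.map_cons, List.foldl_cons]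

theorem maximum_par_colonne_eq_alt (matrice : List (List Int)) :
    maximum_par_colonne matrice = maximum_par_colonne_alt matrice := by
  cases matrice with
  | nil => rfl
  | cons r0 rest =>
    -- A's temp list for column j equals the column of the matrix
    have htemp : ∀ j : Int,
        (PySem.List.pyRange 0 ((r0 :: rest).length : Int) 1).foldl
          (fun acc i => acc ++ [PySem.List.pyGetD (PySem.List.pyGetD (r0 :: rest) i []) j 0]) []
        = (r0 :: rest).map (fun r => PySem.List.pyGetD r j 0) := by
      intro j
      rw [PySem.List.foldl_append_singleton_eq_map]
      have hcomp : (PySem.List.pyRange 0 ((r0 :: rest).length : Int) 1).map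
            (fun i => PySem.List.pyGetD (PySem.List.pyGetD (r0 :: rest) i []) j 0)
          = ((PySem.List.pyRange 0 ((r0 :: rest).length : Int) 1).map
              (fun i => PySem.List.pyGetD (r0 :: rest) i [])).map
              (fun r => PySem.List.pyGetD r j 0) := by
        rw [List.map_map]; rfl
      rw [hcomp, PySem.List.map_pyGetD_pyRange_zero', List.nil_append]
    -- the binary step of B's running maximum is Int.max
    have hmax : (fun a b : Int => if b > a then b else a) = (max : Int → Int → Int) := by
      funext a b; rw [max_def]; split_ifs <;> omega
    -- hence A's per-column value is the running maximum over the column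
    have hcol : ∀ j : Int,
        (PySem.List.max?
          ((PySem.List.pyRange 0 ((r0 :: rest).length : Int) 1).foldl
            (fun acc i => acc ++ [PySem.List.pyGetD (PySem.List.pyGetD (r0 :: rest) i []) j 0]) [])
          (fun x => x)).getD 0
        = (rest.map (fun r => PySem.List.pyGetD r j 0)).foldl
            (fun a b => if b > a then b else a) (PySem.List.pyGetD r0 j 0) := by
      intro j
      rw [htemp j, List.map_cons, PySem.List.max?_id_cons, Option.getD_some, hmax]
    rw [PySem.List.pyRange_one] at hcol
    simp only [Int.sub_zero, Int.toNat_natCast] at hcol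
    show (List.foldl _ ([], 0) (r0 :: rest)).1 = _
    rw [pvFoldA (fun j =>
        (PySem.List.max?
          ((PySem.List.pyRange 0 ((r0 :: rest).length : Int) 1).foldl
            (fun acc i => acc ++ [PySem.List.pyGetD (PySem.List.pyGetD (r0 :: rest) i []) j 0]) [])
          (fun x => x)).getD 0) (r0 :: rest) [] 0]
    show _ = List.foldl _ _ rest
    rw [pvFoldB (((r0 :: rest).length : Int)) rest (fun j => PySem.List.pyGetD r0 j 0)]
    rw [PySem.List.pyRange_one, List.map_map, List.nil_append]
    simp only [Int.sub_zero, Int.toNat_natCast]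
    apply List.map_congr_left
    intro k _
    exact hcol ((0 : Int) + (k : Int))

-- ===== VERDICT (by name: the statement is the Claim_ definition above) =====
theorem maximum_par_colonne_spec : Claim_equal_maximum_par_colonne := by
  intro matrice _ _
  unfold Spec_maximum_par_colonne
  exact maximum_par_colonne_eq_alt matrice
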